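-- pv_equiv track=rewrite | github.com/emanuellegrody/SALVEseq | extractionScripts/barcode/stepOne_ONT.py | has_kmer_hit
-- ===== SOURCE A (Python) =====
-- def has_kmer_hit(seq, kmer_list):
--     """Fast check: does seq contain any k-mer from the list?
--     Uses str.find() (C-level) instead of Python-level character iteration.
--     Returns the position of the first hit, or -1 if none found."""
--     best = -1
--     for km in kmer_list:
--         pos = seq.find(km)
--         if pos >= 0:
--             if best < 0 or pos < best:
--                 best = pos
--             # Early exit: can't find anything earlier than position 0
--             if best == 0:
--                 return 0
--     return best
-- ===== SOURCE B (Python) =====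
-- def has_kmer_hit(seq, kmer_list):
--     """Position-major scan: walk positions left to right and return the first
--     position where any k-mer starts; -1 if none.  Same return value as A."""
--     for i in range(len(seq) + 1):
--         for km in kmer_list:
--             if seq[i:i + len(km)] == km:
--                 return i
--     return -1
-- ===== Notes on version B (the rewrite author's own statement) =====
-- stated objective: alternative
-- what changed: A is pattern-major (one seq.find per kmer, keeping the minimum with an early exit); B is position-major: it scans positions of seq left to right and returns the first position where any kmer starts, so no minimum tracking is needed.
import Mathlib
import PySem

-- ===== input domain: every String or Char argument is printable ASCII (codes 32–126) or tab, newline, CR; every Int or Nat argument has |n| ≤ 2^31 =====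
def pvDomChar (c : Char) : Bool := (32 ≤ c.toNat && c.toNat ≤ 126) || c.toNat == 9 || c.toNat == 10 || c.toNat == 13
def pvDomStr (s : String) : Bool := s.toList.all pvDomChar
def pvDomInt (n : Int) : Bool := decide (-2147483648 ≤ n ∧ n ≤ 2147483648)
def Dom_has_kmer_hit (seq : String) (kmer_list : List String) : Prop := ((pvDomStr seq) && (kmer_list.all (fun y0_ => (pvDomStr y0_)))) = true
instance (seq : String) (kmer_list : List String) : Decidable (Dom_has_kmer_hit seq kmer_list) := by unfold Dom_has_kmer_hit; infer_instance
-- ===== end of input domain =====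

-- B replaces A's pattern-major minimum-of-find scan by a position-major scan returning the
-- first position where any kmer starts (objective: alternative; same return value).

-- ===== PORT A =====
-- loop 'for km in kmer_list' with accumulator 'best' and the early return at best == 0
def hasKmerGoA (seq : String) (best : Int) : List String → Int
  | [] => best
  | km :: rest =>
    let pos := PySem.Str.find seq km
    if 0 ≤ pos then
      let best' := if best < 0 ∨ pos < best then pos else best
      if best' = 0 then 0 else hasKmerGoA seq best' rest
    else hasKmerGoA seq best rest

def has_kmer_hit (seq : String) (kmer_list : List String) : Int :=
  hasKmerGoA seq (-1) kmer_list

-- ===== PORT B =====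
-- inner loop 'for km in kmer_list: if seq[i:i+len(km)] == km: return i'
def hasKmerMatchAt (seq : String) (kmer_list : List String) (i : Nat) : Bool :=
  kmer_list.any (fun km =>
    PySem.Str.slice seq (some (i : Int)) (some ((i : Int) + PySem.Str.len km)) == km)

-- outer loop 'for i in range(len(seq) + 1)', fuel = remaining iterations
def hasKmerGoB (seq : String) (kmer_list : List String) : Nat → Nat → Int
  | 0, _ => -1
  | fuel + 1, i => if hasKmerMatchAt seq kmer_list i then (i : Int) else hasKmerGoB seq kmer_list fuel (i + 1)

def has_kmer_hit_alt (seq : String) (kmer_list : List String) : Int :=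
  hasKmerGoB seq kmer_list (seq.toList.length + 1) 0

-- ===== PRECONDITION & SPEC =====
def Spec_has_kmer_hit (seq : String) (kmer_list : List String) (out : Int) : Prop := out = has_kmer_hit_alt seq kmer_list
instance (seq : String) (kmer_list : List String) (out : Int) : Decidable (Spec_has_kmer_hit seq kmer_list out) := by unfold Spec_has_kmer_hit; infer_instance

-- ===== CLAIM (what is proved, stated in full; the proofs are below) =====
def Claim_equal_has_kmer_hit : Prop := ∀ (seq : String) (kmer_list : List String), Dom_has_kmer_hit seq kmer_list → Spec_has_kmer_hit seq kmer_list (has_kmer_hit seq kmer_list)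

-- ===== LEMMAS AND PROOFS =====

-- A's accumulator update as a binary operation
def hkComb (b p : Int) : Int := if 0 ≤ p then (if b < 0 ∨ p < b then p else b) else b

lemma hkComb_zero (p : Int) : hkComb 0 p = 0 := by
  unfold hkComb; split_ifs <;> omega

lemma foldl_hkComb_zero (l : List Int) : l.foldl hkComb 0 = 0 := by
  induction l with
  | nil => rfl
  | cons p t ih => simpa [List.foldl, hkComb_zero] using ih

lemma hasKmerGoA_eq_foldl (seq : String) (kms : List String) (best : Int) :
    hasKmerGoA seq best kms = (kms.map (fun km => PySem.Str.find seq km)).foldl hkComb best := by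
  induction kms generalizing best with
  | nil => rfl
  | cons km rest ih =>
    simp only [hasKmerGoA, List.map, List.foldl]
    by_cases hp : 0 ≤ PySem.Str.find seq km
    · simp only [hp, if_true]
      by_cases hz : (if best < 0 ∨ PySem.Str.find seq km < best then PySem.Str.find seq km else best) = 0
      · simp only [hz, if_true]
        have : hkComb best (PySem.Str.find seq km) = 0 := by
          unfold hkComb; rw [if_pos hp]; exact hz
        rw [this, foldl_hkComb_zero]
      · simp only [hz, if_false, ih]
        congr 1
        unfold hkComb; rw [if_pos hp]
    · simp only [hp, if_false, ih]
      congr 1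
      unfold hkComb; rw [if_neg hp]

-- generic facts about folding hkComb
lemma foldl_hkComb_mem (l : List Int) (b : Int) :
    l.foldl hkComb b = b ∨ l.foldl hkComb b ∈ l := by
  induction l generalizing b with
  | nil => left; rfl
  | cons p t ih =>
    rcases ih (hkComb b p) with h | h
    · rw [List.foldl, h]
      unfold hkComb
      split_ifs <;> simp
    · right; exact List.mem_cons_of_mem _ h

lemma hkComb_le_right (b p : Int) (hp : 0 ≤ p) : hkComb b p ≤ p ∧ 0 ≤ hkComb b p := by
  unfold hkComb; split_ifs <;> omega

lemma hkComb_le_left (b p : Int) (hb : 0 ≤ b) : hkComb b p ≤ b ∧ 0 ≤ hkComb b p := by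
  unfold hkComb; split_ifs <;> omega

lemma foldl_hkComb_le_init (l : List Int) (b : Int) (hb : 0 ≤ b) :
    l.foldl hkComb b ≤ b := by
  induction l generalizing b with
  | nil => simp
  | cons p t ih =>
    rw [List.foldl]
    exact le_trans (ih _ (hkComb_le_left b p hb).2) (hkComb_le_left b p hb).1

lemma foldl_hkComb_le_mem (l : List Int) (b p : Int) (hp : p ∈ l) (hp0 : 0 ≤ p) :
    l.foldl hkComb b ≤ p := by
  induction l generalizing b with
  | nil => simp at hp
  | cons q t ih =>
    rw [List.foldl]
    rcases List.mem_cons.mp hp with rfl | hmem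
    · exact le_trans (foldl_hkComb_le_init t _ (hkComb_le_right b p hp0).2) (hkComb_le_right b p hp0).1
    · exact ih _ hmem

lemma foldl_hkComb_neg (l : List Int) (b : Int) (h : l.foldl hkComb b < 0) :
    b < 0 ∧ ∀ p ∈ l, p < 0 := by
  induction l generalizing b with
  | nil => simpa using h
  | cons p t ih =>
    rw [List.foldl] at h
    obtain ⟨hc, ht⟩ := ih _ h
    have : b < 0 ∧ p < 0 := by
      unfold hkComb at hc; split_ifs at hc <;> omega
    exact ⟨this.1, fun q hq => by rcases List.mem_cons.mp hq with rfl | hq; exact this.2; exact ht q hq⟩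

lemma foldl_hkComb_ge_neg_one (l : List Int) (b : Int) (hb : -1 ≤ b) (hl : ∀ p ∈ l, -1 ≤ p) :
    -1 ≤ l.foldl hkComb b := by
  induction l generalizing b with
  | nil => simpa
  | cons p t ih =>
    rw [List.foldl]
    refine ih _ ?_ (fun q hq => hl q (List.mem_cons_of_mem _ hq))
    have := hl p (List.mem_cons_self ..)
    unfold hkComb; split_ifs <;> omega

-- the value A computes, as a fold
def hkM (seq : String) (kms : List String) : Int :=
  (kms.map (fun km => PySem.Str.find seq km)).foldl hkComb (-1)

lemma hkM_neg (seq : String) (kms : List String) (h : hkM seq kms < 0) :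
    ∀ km ∈ kms, PySem.Str.find seq km < 0 := by
  intro km hkm
  exact (foldl_hkComb_neg _ _ h).2 _ (List.mem_map_of_mem hkm)

lemma hkM_mem (seq : String) (kms : List String) (h : 0 ≤ hkM seq kms) :
    ∃ km ∈ kms, PySem.Str.find seq km = hkM seq kms := by
  rcases foldl_hkComb_mem (kms.map (fun km => PySem.Str.find seq km)) (-1) with he | he
  · unfold hkM at h; omega
  · obtain ⟨km, hkm, heq⟩ := List.mem_map.mp he
    exact ⟨km, hkm, heq⟩

lemma hkM_le (seq : String) (kms : List String) (km : String) (hkm : km ∈ kms)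
    (h : 0 ≤ PySem.Str.find seq km) : hkM seq kms ≤ PySem.Str.find seq km :=
  foldl_hkComb_le_mem _ _ _ (List.mem_map_of_mem hkm) h

lemma hkM_ge_neg_one (seq : String) (kms : List String) : -1 ≤ hkM seq kms := by
  refine foldl_hkComb_ge_neg_one _ _ (by norm_num) ?_
  intro p hp
  obtain ⟨km, _, rfl⟩ := List.mem_map.mp hp
  rw [PySem.Str.find_eq]
  exact PySem.Chars.neg_one_le_find _ _

-- the match predicate B tests, in prefix form
lemma hasKmerMatchAt_iff (seq : String) (kms : List String) (i : Nat) :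
    hasKmerMatchAt seq kms i = true ↔ ∃ km ∈ kms, km.toList <+: seq.toList.drop i := by
  unfold hasKmerMatchAt
  rw [List.any_eq_true]
  constructor
  · rintro ⟨km, hkm, hb⟩
    refine ⟨km, hkm, ?_⟩
    have := congrArg String.toList (eq_of_beq hb)
    rw [PySem.Str.toList_slice, PySem.Chars.slice_eq_listSlice] at this
    have hlen : PySem.Str.len km = ((km.toList.length : Nat) : Int) := by
      simp [PySem.Str.len_eq]
    rw [hlen, PySem.List.slice_natCast_add] at this
    rw [List.prefix_iff_eq_take]
    exact this.symm
  · rintro ⟨km, hkm, hpre⟩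
    refine ⟨km, hkm, ?_⟩
    have heq : PySem.Str.slice seq (some (i : Int)) (some ((i : Int) + PySem.Str.len km)) = km := by
      apply String.toList_inj.mp
      rw [PySem.Str.toList_slice, PySem.Chars.slice_eq_listSlice]
      have hlen : PySem.Str.len km = ((km.toList.length : Nat) : Int) := by
        simp [PySem.Str.len_eq]
      rw [hlen, PySem.List.slice_natCast_add]
      exact (List.prefix_iff_eq_take.mp hpre).symm
    rw [beq_iff_eq]
    exact heq

-- a match at i gives a nonnegative find bounded by i
lemma find_le_of_prefix (seq : String) (km : String) (i : Nat)
    (h : km.toList <+: seq.toList.drop i) :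
    0 ≤ PySem.Str.find seq km ∧ PySem.Str.find seq km ≤ (i : Int) := by
  rw [PySem.Str.find_eq]
  have hinf : km.toList <:+: seq.toList :=
    h.isInfix.trans (List.drop_suffix i seq.toList).isInfix
  have h0 : 0 ≤ PySem.Chars.find seq.toList km.toList :=
    (PySem.Chars.find_nonneg_iff _ _).mpr hinf
  refine ⟨h0, ?_⟩
  obtain ⟨-, hmin⟩ := PySem.Chars.find_spec h0
  by_contra hgt
  exact hmin i (by omega) h

-- B's scan, started at i with the right fuel and no match below i, computes hkM
lemma hasKmerGoB_spec (seq : String) (kms : List String) (fuel i : Nat)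
    (hfi : i + fuel = seq.toList.length + 1)
    (hlt : ∀ j < i, ¬ (∃ km ∈ kms, km.toList <+: seq.toList.drop j)) :
    hasKmerGoB seq kms fuel i = hkM seq kms := by
  induction fuel generalizing i with
  | zero =>
    rw [hasKmerGoB]
    by_contra hne
    have hge : 0 ≤ hkM seq kms := by
      have := hkM_ge_neg_one seq kms
      omega
    obtain ⟨km, hkm, hfind⟩ := hkM_mem seq kms hge
    rw [PySem.Str.find_eq] at hfind
    have h0 : 0 ≤ PySem.Chars.find seq.toList km.toList := by rw [hfind]; exact hge
    obtain ⟨hpre, -⟩ := PySem.Chars.find_spec h0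
    have hle : PySem.Chars.find seq.toList km.toList ≤ (seq.toList.length : Int) :=
      PySem.Chars.find_le_length _ _
    exact hlt (PySem.Chars.find seq.toList km.toList).toNat (by omega) ⟨km, hkm, hpre⟩
  | succ f ih =>
    rw [hasKmerGoB]
    by_cases hm : hasKmerMatchAt seq kms i = true
    · rw [if_pos hm]
      obtain ⟨km, hkm, hpre⟩ := (hasKmerMatchAt_iff seq kms i).mp hm
      obtain ⟨h0, hle⟩ := find_le_of_prefix seq km i hpre
      have hMle : hkM seq kms ≤ (i : Int) :=
        le_trans (hkM_le seq kms km hkm h0) hle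
      have hM0 : 0 ≤ hkM seq kms := by
        by_contra hneg
        have := hkM_neg seq kms (by omega) km hkm
        omega
      obtain ⟨km', hkm', hfind'⟩ := hkM_mem seq kms hM0
      rw [PySem.Str.find_eq] at hfind'
      have h0' : 0 ≤ PySem.Chars.find seq.toList km'.toList := by rw [hfind']; exact hM0
      obtain ⟨hpre', -⟩ := PySem.Chars.find_spec h0'
      have hiM : ¬ (PySem.Chars.find seq.toList km'.toList).toNat < i :=
        fun hj => hlt _ hj ⟨km', hkm', hpre'⟩
      omega
    · rw [if_neg hm]
      refine ih (i + 1) (by omega) ?_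
      intro j hj
      rcases Nat.lt_succ_iff_lt_or_eq.mp hj with hj' | rfl
      · exact hlt j hj'
      · intro hP
        exact hm ((hasKmerMatchAt_iff seq kms j).mpr hP)

-- ===== VERDICT (by name: the statement is the Claim_ definition above) =====
theorem has_kmer_hit_spec : Claim_equal_has_kmer_hit := by
  intro seq kms _
  unfold Spec_has_kmer_hit has_kmer_hit has_kmer_hit_alt
  rw [hasKmerGoA_eq_foldl]
  rw [hasKmerGoB_spec seq kms (seq.toList.length + 1) 0 (by omega) (by omega)]
  rfl
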